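-- pv_equiv track=rewrite | github.com/kxl5639/workflow | title_model.py | _remove_end_blanks
-- ===== SOURCE A (Python) =====
-- def _remove_end_blanks(list_obj):
--     '''Remove blank items at the end of a list. Retains blank items in middle of list.'''
--
--     # Check if the last item is a blank
--     if list_obj and list_obj[-1] != '':
--         return list_obj, []  # If the last item is not a blank, return the original list and an empty list of removed indices
--
--     # Find the first non-blank item from the end of the list
--     last_non_blank_index = len(list_obj)
--
--     for index in range(len(list_obj) - 1, -1, -1):
--         if list_obj[index] != '':
--             last_non_blank_index = index + 1
--             break
--
--     # Calculate the indices of the removed blank items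
--     removed_indices = list(range(last_non_blank_index, len(list_obj)))
--
--     # Slicing to remove trailing blanks
--     modified_list = list_obj[:last_non_blank_index]
--
--     return modified_list, removed_indices
-- ===== SOURCE B (Python) =====
-- def _remove_end_blanks(list_obj):
--     '''Remove blank items at the end of a list. Retains blank items in middle of list.'''
--     cut = 0
--     for i, item in enumerate(list_obj):
--         if item != '':
--             cut = i + 1
--     return list_obj[:cut], list(range(cut, len(list_obj)))
-- ===== Notes on version B (the rewrite author's own statement) =====
-- stated objective: alternative
-- what changed: Replaces A's early-return shortcut plus backward break-on-first-non-blank scan by a single forward pass that keeps a running cut = index-after-last-non-blank, then slices and builds the removed-index range from cut.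
-- intended difference: On nonempty all-blank lists A's backward loop never fires, so the default len(list_obj) keeps every blank and A returns (list_obj, []); B returns ([], [0..n-1]), the intended removal of the trailing (here: all) blanks. — e.g. on _remove_end_blanks([""]): A returns ([""], []), B returns ([], [0])
import Mathlib
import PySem

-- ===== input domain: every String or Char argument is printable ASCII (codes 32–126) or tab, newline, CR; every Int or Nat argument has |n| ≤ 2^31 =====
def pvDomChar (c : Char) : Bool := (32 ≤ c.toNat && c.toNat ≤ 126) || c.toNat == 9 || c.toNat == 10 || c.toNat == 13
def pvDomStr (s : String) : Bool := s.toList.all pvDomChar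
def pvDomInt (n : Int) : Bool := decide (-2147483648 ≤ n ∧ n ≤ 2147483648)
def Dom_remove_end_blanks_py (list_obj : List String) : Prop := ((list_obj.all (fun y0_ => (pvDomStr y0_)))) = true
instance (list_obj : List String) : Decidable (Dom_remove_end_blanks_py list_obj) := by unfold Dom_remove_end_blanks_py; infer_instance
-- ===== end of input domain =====

-- B replaces A's early-return + backward break-scan by one forward pass keeping a running cut index
-- (alternative decomposition, same cost); on nonempty all-blank lists A keeps everything while B removes all blanks (see D_).


-- ===== PORT A =====
-- the 'for index in range(len-1, -1, -1): if …: break' loop; d is the pre-loop value of last_non_blank_index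
def pvA_loop (xs : List String) (d : Int) : List Int → Int
  | [] => d
  | i :: rest => if PySem.List.pyGetD xs i "" ≠ "" then i + 1 else pvA_loop xs d rest

def remove_end_blanks_py (list_obj : List String) : List String × List Int :=
  if list_obj ≠ [] ∧ PySem.List.pyGetD list_obj (-1) "" ≠ "" then
    (list_obj, [])
  else
    let n : Int := PySem.List.len list_obj
    let last_non_blank_index := pvA_loop list_obj n (PySem.List.pyRange (n - 1) (-1) (-1))
    (PySem.List.slice list_obj none (some last_non_blank_index),
     PySem.List.pyRange last_non_blank_index n 1)

-- ===== PORT B =====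
def remove_end_blanks_py_alt (list_obj : List String) : List String × List Int :=
  let cut : Int := (PySem.List.enumerate list_obj 0).foldl
    (fun cut p => if p.2 ≠ "" then p.1 + 1 else cut) 0
  (PySem.List.slice list_obj none (some cut),
   PySem.List.pyRange cut (PySem.List.len list_obj) 1)

-- ===== PRECONDITION & SPEC =====
-- On nonempty all-blank lists A's backward loop never fires, so the default len(list_obj) keeps every
-- blank and A returns (list_obj, []); B returns ([], [0..n-1]), the intended removal of the trailing blanks.
def D_remove_end_blanks_py (list_obj : List String) : Prop :=
  list_obj ≠ [] ∧ ∀ s ∈ list_obj, s = ""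
instance (list_obj : List String) : Decidable (D_remove_end_blanks_py list_obj) := by
  unfold D_remove_end_blanks_py; infer_instance

def Spec_remove_end_blanks_py (list_obj : List String) (out : List String × List Int) : Prop :=
  ¬ D_remove_end_blanks_py list_obj → out = remove_end_blanks_py_alt list_obj
instance (list_obj : List String) (out : List String × List Int) : Decidable (Spec_remove_end_blanks_py list_obj out) := by
  unfold Spec_remove_end_blanks_py; infer_instance

def pvDiffWitness_remove_end_blanks_py : List String := [""]
def pvDiffWitnessOut_remove_end_blanks_py : (List String × List Int) × (List String × List Int) :=
  (([""], []), ([], [0]))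

-- ===== CLAIM (what is proved, stated in full; the proofs are below) =====
def Claim_unchanged_remove_end_blanks_py : Prop := ∀ (list_obj : List String), Dom_remove_end_blanks_py list_obj → Spec_remove_end_blanks_py list_obj (remove_end_blanks_py list_obj)
def Claim_changed_remove_end_blanks_py : Prop := Dom_remove_end_blanks_py (pvDiffWitness_remove_end_blanks_py) ∧ D_remove_end_blanks_py (pvDiffWitness_remove_end_blanks_py) ∧ remove_end_blanks_py (pvDiffWitness_remove_end_blanks_py) = pvDiffWitnessOut_remove_end_blanks_py.1 ∧ remove_end_blanks_py_alt (pvDiffWitness_remove_end_blanks_py) = pvDiffWitnessOut_remove_end_blanks_py.2 ∧ pvDiffWitnessOut_remove_end_blanks_py.1 ≠ pvDiffWitnessOut_remove_end_blanks_py.2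
def Claim_exact_remove_end_blanks_py : Prop := ∀ (list_obj : List String), Dom_remove_end_blanks_py list_obj → D_remove_end_blanks_py list_obj → remove_end_blanks_py list_obj ≠ remove_end_blanks_py_alt list_obj

-- ===== LEMMAS AND PROOFS =====
-- index just past the last non-blank element (0 if none)
def pvCut (xs : List String) : Nat := xs.length - (xs.reverse.takeWhile (· == "")).length

theorem pvCut_append_nonblank (ys : List String) (s : String) (hs : s ≠ "") :
    pvCut (ys ++ [s]) = ys.length + 1 := by
  simp [pvCut, hs]

theorem pvCut_append_blank (ys : List String) :
    pvCut (ys ++ [""]) = pvCut ys := by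
  simp [pvCut]

theorem pvCut_all_blank (xs : List String) (h : ∀ s ∈ xs, s = "") : pvCut xs = 0 := by
  have : xs.reverse.takeWhile (· == "") = xs.reverse := by
    apply List.takeWhile_eq_self_iff.mpr
    intro a ha
    simpa using h a (List.mem_reverse.mp ha)
  simp [pvCut, this]

theorem pvEnumerate_append_singleton (ys : List String) (s : String) (k : Int) :
    PySem.List.enumerate (ys ++ [s]) k
      = PySem.List.enumerate ys k ++ [(k + ys.length, s)] := by
  induction ys generalizing k with
  | nil => simp [PySem.List.enumerate_nil, PySem.List.enumerate_cons]
  | cons y ys ih =>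
    simp only [List.cons_append, PySem.List.enumerate_cons, ih, List.length_cons,
      List.cons.injEq, List.append_cancel_left_eq, List.cons.injEq, Prod.mk.injEq,
      and_true, true_and]
    push_cast; ring

theorem pvB_cut_eq (xs : List String) :
    (PySem.List.enumerate xs 0).foldl (fun cut p => if p.2 ≠ "" then p.1 + 1 else cut) 0
      = (pvCut xs : Int) := by
  induction xs using List.reverseRecOn with
  | nil => simp [PySem.List.enumerate_nil, pvCut]
  | append_singleton ys s ih =>
    rw [pvEnumerate_append_singleton, List.foldl_append]
    by_cases hs : s = ""
    · subst hs
      simpa [pvCut_append_blank] using ih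
    · simp [hs, pvCut_append_nonblank ys s hs]

theorem pvA_loop_irrel (ys : List String) (s : String) (d : Int) (idxs : List Int)
    (h : ∀ i ∈ idxs, 0 ≤ i ∧ i < (ys.length : Int)) :
    pvA_loop (ys ++ [s]) d idxs = pvA_loop ys d idxs := by
  induction idxs with
  | nil => rfl
  | cons i rest ih =>
    have hi := h i (by simp)
    have hget : PySem.List.pyGetD (ys ++ [s]) i "" = PySem.List.pyGetD ys i "" := by
      rw [PySem.List.pyGetD_eq_getElem _ _ hi.1 (by simp; omega),
          PySem.List.pyGetD_eq_getElem _ _ hi.1 hi.2]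
      exact List.getElem_append_left (by omega)
    simp only [pvA_loop, hget]
    split
    · rfl
    · exact ih (fun j hj => h j (List.mem_cons_of_mem _ hj))

theorem pvA_loop_full (xs : List String) (d : Int) :
    pvA_loop xs d (PySem.List.pyRange ((xs.length : Int) - 1) (-1) (-1))
      = if ∀ s ∈ xs, s = "" then d else (pvCut xs : Int) := by
  induction xs using List.reverseRecOn generalizing d with
  | nil =>
    rw [PySem.List.pyRange_neg_one_eq_nil (by simp)]
    simp [pvA_loop]
  | append_singleton ys s ih =>
    have hlen : ((ys ++ [s]).length : Int) - 1 = (ys.length : Int) := by simp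
    rw [hlen, PySem.List.pyRange_neg_one_cons (by omega)]
    have hget : PySem.List.pyGetD (ys ++ [s]) (ys.length : Int) "" = s := by
      rw [PySem.List.pyGetD_natCast]
      simp [List.getD]
    simp only [pvA_loop, hget]
    by_cases hs : s = ""
    · subst hs
      rw [if_neg (by simp)]
      rw [pvA_loop_irrel ys "" d _ (by
        intro i hi
        have := (PySem.List.mem_pyRange_neg_one).mp hi
        omega)]
      rw [ih d]
      by_cases hall : ∀ t ∈ ys, t = ""
      · rw [if_pos hall, if_pos (fun t ht => by
          rcases List.mem_append.mp ht with h | h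
          · exact hall t h
          · simpa using h)]
      · rw [if_neg hall,
          if_neg (fun hc => hall (fun t ht => hc t (List.mem_append_left _ ht))),
          pvCut_append_blank]
    · rw [if_pos hs, if_neg (fun hc => hs (hc s (List.mem_append_right _ (by simp))))]
      rw [pvCut_append_nonblank ys s hs]
      push_cast
      ring

theorem pvAlt_eq (xs : List String) :
    remove_end_blanks_py_alt xs
      = (xs.take (pvCut xs), PySem.List.pyRange (pvCut xs) (xs.length : Int) 1) := by
  simp only [remove_end_blanks_py_alt, pvB_cut_eq, PySem.List.len_eq,
    PySem.List.slice_to_natCast]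

theorem remove_end_blanks_py_spec : Claim_unchanged_remove_end_blanks_py := by
  intro xs _ hD
  rw [pvAlt_eq]
  by_cases hne : xs = []
  · subst hne; decide
  · obtain ⟨ys, s, rfl⟩ : ∃ ys s, xs = ys ++ [s] := by
      rcases List.eq_nil_or_concat xs with h | ⟨ys, s, h⟩
      · exact absurd h hne
      · exact ⟨ys, s, by simpa [List.concat_eq_append] using h⟩
    have hnall : ¬ ∀ t ∈ ys ++ [s], t = "" := fun hall =>
      hD (by unfold D_remove_end_blanks_py; exact ⟨hne, hall⟩)
    simp only [remove_end_blanks_py, PySem.List.len_eq]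
    by_cases hs : s = ""
    · rw [if_neg (by subst hs; simp [PySem.List.pyGetD_neg_one_append_singleton])]
      rw [pvA_loop_full (ys ++ [s]) _, if_neg hnall, PySem.List.slice_to_natCast]
    · rw [if_pos ⟨hne, by rw [PySem.List.pyGetD_neg_one_append_singleton]; exact hs⟩]
      have hcut : pvCut (ys ++ [s]) = (ys ++ [s]).length := by
        rw [pvCut_append_nonblank ys s hs]; simp
      rw [hcut, List.take_length, PySem.List.pyRange_one_eq_nil le_rfl]

theorem remove_end_blanks_py_changed : Claim_changed_remove_end_blanks_py := by
  unfold Claim_changed_remove_end_blanks_py; decide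

theorem remove_end_blanks_py_tight : Claim_exact_remove_end_blanks_py := by
  intro xs _ hD heq
  obtain ⟨hne, hall⟩ := hD
  obtain ⟨ys, s, rfl⟩ : ∃ ys s, xs = ys ++ [s] := by
    rcases List.eq_nil_or_concat xs with h | ⟨ys, s, h⟩
    · exact absurd h hne
    · exact ⟨ys, s, by simpa [List.concat_eq_append] using h⟩
  have hs : s = "" := hall s (List.mem_append_right _ (by simp))
  have hsnd := congrArg Prod.snd heq
  rw [pvAlt_eq] at hsnd
  simp only [remove_end_blanks_py, PySem.List.len_eq] at hsnd
  rw [if_neg (by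
      rintro ⟨-, hlast⟩
      rw [PySem.List.pyGetD_neg_one_append_singleton] at hlast
      exact hlast hs)] at hsnd
  rw [pvA_loop_full (ys ++ [s]) _, if_pos hall, pvCut_all_blank _ hall] at hsnd
  rw [PySem.List.pyRange_one_eq_nil le_rfl] at hsnd
  have h0 : (0 : Int) ∈ PySem.List.pyRange (((0 : Nat) : Int)) (((ys ++ [s]).length : Nat) : Int) 1 :=
    PySem.List.mem_pyRange_one.mpr ⟨by simp, by simp⟩
  rw [← hsnd] at h0
  simp at h0
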